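-- pv_equiv track=rewrite | github.com/jay-acosta/blis-code-generator | level4_gen/formatters.py | convert_types_to_type_func_args
-- ===== SOURCE A (Python) =====
-- SCALAR_SYMBOLS = ["alpha", "beta", "gamma", "delta"]
--
-- VECTOR_SYMBOLS = ["x", "y", "z"]
--
-- MATRIX_SYMBOLS = ["a", "b", "c", "d", "e", "f", "g", "h"]
--
-- def convert_obj_types_to_names(o_types):
-- 	s_idx, v_idx, m_idx = 0, 0, 0
--
-- 	names = []
-- 	for object_type in o_types:
-- 		# iterate through object types "s", "v", "m"
-- 		# select a name for a given datatype then move to the next object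
-- 		if object_type == "s":
-- 			names += [SCALAR_SYMBOLS[s_idx]]
-- 			s_idx += 1
-- 		elif object_type == "v":
-- 			names += [VECTOR_SYMBOLS[v_idx]]
-- 			v_idx += 1
-- 		else:
-- 			names += [MATRIX_SYMBOLS[m_idx]]
-- 			m_idx += 1
--
-- 	return names
--
-- def convert_types_to_type_func_args(o_types):
-- 	object_names = convert_obj_types_to_names(o_types)
--
-- 	names = []
--
-- 	for object_type, object_name in zip(o_types, object_names):
-- 		if object_type == "s":
-- 			names += [f"ctype*  {object_name}"]
-- 		elif object_type == "v":
-- 			names += [f"ctype*  {object_name}, inc_t inc{object_name}"]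
-- 		else:
-- 			names += [f"ctype*  {object_name}, inc_t rs_{object_name}, inc_t cs_{object_name}"]
--
-- 	return names
-- ===== SOURCE B (Python) =====
-- SCALAR_SYMBOLS = ["alpha", "beta", "gamma", "delta"]
--
-- VECTOR_SYMBOLS = ["x", "y", "z"]
--
-- MATRIX_SYMBOLS = ["a", "b", "c", "d", "e", "f", "g", "h"]
--
-- def convert_types_to_type_func_args(o_types):
--     s_idx, v_idx, m_idx = 0, 0, 0
--     args = []
--     for object_type in o_types:
--         if object_type == "s":
--             name = SCALAR_SYMBOLS[s_idx]
--             s_idx += 1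
--             args.append(f"ctype*  {name}")
--         elif object_type == "v":
--             name = VECTOR_SYMBOLS[v_idx]
--             v_idx += 1
--             args.append(f"ctype*  {name}, inc_t inc{name}")
--         else:
--             name = MATRIX_SYMBOLS[m_idx]
--             m_idx += 1
--             args.append(f"ctype*  {name}, inc_t rs_{name}, inc_t cs_{name}")
--     return args
-- ===== Notes on version B (the rewrite author's own statement) =====
-- stated objective: simpler
-- what changed: Fused A's two passes (build a name table, then zip it with the types and format) into one loop with three counters that picks the symbol and emits the formatted argument string directly, eliminating convert_obj_types_to_names and the intermediate names list.
import Mathlib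
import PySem

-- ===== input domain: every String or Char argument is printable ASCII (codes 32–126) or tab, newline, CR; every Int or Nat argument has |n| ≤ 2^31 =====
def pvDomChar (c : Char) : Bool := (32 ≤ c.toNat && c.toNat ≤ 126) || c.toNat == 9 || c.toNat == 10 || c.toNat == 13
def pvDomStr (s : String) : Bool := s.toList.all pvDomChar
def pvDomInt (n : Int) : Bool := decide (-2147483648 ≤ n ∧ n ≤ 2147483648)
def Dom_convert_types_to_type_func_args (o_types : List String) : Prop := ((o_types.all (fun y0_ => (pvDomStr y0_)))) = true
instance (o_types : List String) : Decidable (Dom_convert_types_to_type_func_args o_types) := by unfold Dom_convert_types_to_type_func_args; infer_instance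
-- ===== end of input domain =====

-- ===== PORT A =====
-- B fuses A's two passes (name table + zip/format) into one counter loop; equal wherever
-- the Python returns (Pre_ excludes inputs where Python raises IndexError on symbol lists;
-- there the ports use getD "" — see comment at pvSym).
def pvScalarSymbols : List String := ["alpha", "beta", "gamma", "delta"]
def pvVectorSymbols : List String := ["x", "y", "z"]
def pvMatrixSymbols : List String := ["a", "b", "c", "d", "e", "f", "g", "h"]

-- Python list indexing with a nonnegative index; out of range Python raises IndexError
-- (excluded by Pre_), the port returns "" there.
def pvSym (l : List String) (i : Nat) : String := l.getD i ""

-- port of convert_obj_types_to_names (loop = structural recursion over the same counters)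
def pvNames : List String → Nat → Nat → Nat → List String
  | [], _, _, _ => []
  | t :: ts, s, v, m =>
    if t == "s" then pvSym pvScalarSymbols s :: pvNames ts (s + 1) v m
    else if t == "v" then pvSym pvVectorSymbols v :: pvNames ts s (v + 1) m
    else pvSym pvMatrixSymbols m :: pvNames ts s v (m + 1)

-- port of A's second loop over zip(o_types, object_names)
def pvFmtZip : List (String × String) → List String
  | [] => []
  | (t, n) :: rest =>
    (if t == "s" then "ctype*  " ++ n
     else if t == "v" then "ctype*  " ++ n ++ ", inc_t inc" ++ n
     else "ctype*  " ++ n ++ ", inc_t rs_" ++ n ++ ", inc_t cs_" ++ n) :: pvFmtZip rest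

def convert_types_to_type_func_args (o_types : List String) : List String :=
  pvFmtZip (o_types.zip (pvNames o_types 0 0 0))

-- ===== PORT B =====
-- single fused pass (transliteration of Source B's loop)
def pvFused : List String → Nat → Nat → Nat → List String
  | [], _, _, _ => []
  | t :: ts, s, v, m =>
    if t == "s" then
      ("ctype*  " ++ pvSym pvScalarSymbols s) :: pvFused ts (s + 1) v m
    else if t == "v" then
      (let n := pvSym pvVectorSymbols v
       "ctype*  " ++ n ++ ", inc_t inc" ++ n) :: pvFused ts s (v + 1) m
    else
      (let n := pvSym pvMatrixSymbols m
       "ctype*  " ++ n ++ ", inc_t rs_" ++ n ++ ", inc_t cs_" ++ n) :: pvFused ts s v (m + 1)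

def convert_types_to_type_func_args_alt (o_types : List String) : List String :=
  pvFused o_types 0 0 0

-- ===== PRECONDITION & SPEC =====
-- Pre_ excludes exactly the inputs on which the Python A (and B) raise IndexError:
-- more than 4 "s" entries, more than 3 "v" entries, or more than 8 other entries.
def Pre_convert_types_to_type_func_args (o_types : List String) : Prop :=
  o_types.count "s" ≤ 4 ∧ o_types.count "v" ≤ 3 ∧
  (o_types.filter (fun t => t ≠ "s" ∧ t ≠ "v")).length ≤ 8
instance (o_types : List String) : Decidable (Pre_convert_types_to_type_func_args o_types) := by unfold Pre_convert_types_to_type_func_args; infer_instance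

def pvWitness_convert_types_to_type_func_args : List String := ["s", "v", "m", "q", "v"]

def Spec_convert_types_to_type_func_args (o_types : List String) (out : List String) : Prop := out = convert_types_to_type_func_args_alt o_types
instance (o_types : List String) (out : List String) : Decidable (Spec_convert_types_to_type_func_args o_types out) := by unfold Spec_convert_types_to_type_func_args; infer_instance

-- ===== CLAIM (what is proved, stated in full; the proofs are below) =====
def Claim_equal_convert_types_to_type_func_args : Prop := ∀ (o_types : List String), Dom_convert_types_to_type_func_args o_types → Pre_convert_types_to_type_func_args o_types → Spec_convert_types_to_type_func_args o_types (convert_types_to_type_func_args o_types)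

-- ===== LEMMAS AND PROOFS =====

theorem pvFused_eq_fmtZip_names (l : List String) (s v m : Nat) :
    pvFused l s v m = pvFmtZip (l.zip (pvNames l s v m)) := by
  induction l generalizing s v m with
  | nil => rfl
  | cons t ts ih =>
    by_cases hs : t == "s"
    · simp [pvFused, pvNames, pvFmtZip, hs, ih]
    · by_cases hv : t == "v"
      · simp [pvFused, pvNames, pvFmtZip, hs, hv, ih]
      · simp [pvFused, pvNames, pvFmtZip, hs, hv, ih]

-- ===== VERDICT (by name: the statement is the Claim_ definition above) =====
theorem convert_types_to_type_func_args_spec : Claim_equal_convert_types_to_type_func_args := by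
  intro o_types _ _
  unfold Spec_convert_types_to_type_func_args convert_types_to_type_func_args convert_types_to_type_func_args_alt
  exact (pvFused_eq_fmtZip_names o_types 0 0 0).symm
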